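-- pv_equiv track=rewrite | github.com/thm-msror/SLR-Auto | src/gpt_screener_initial.py | count_answers
-- ===== SOURCE A (Python) =====
-- from typing import Any, Dict, List
--
-- def count_answers(parsed: List[Dict[str, str]]) -> Dict[str, Dict[str, int]]:
--     counts = {
--         "include": {"yes": 0, "no": 0, "insufficient": 0},
--         "exclude": {"yes": 0, "no": 0, "insufficient": 0},
--     }
--     for item in parsed:
--         answer = (item.get("answer") or "").strip().upper()
--         criterion = (item.get("criterion") or "").strip().upper()
--         if criterion.startswith("INCLUDE"):
--             group = "include"
--         elif criterion.startswith("EXCLUDE"):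
--             group = "exclude"
--         else:
--             continue
--
--         if answer == "YES":
--             counts[group]["yes"] += 1
--         elif answer == "NO":
--             counts[group]["no"] += 1
--         else:
--             counts[group]["insufficient"] += 1
--     return counts
-- ===== SOURCE B (Python) =====
-- def classify(item):
--     criterion = (item.get("criterion") or "").strip().upper()
--     if criterion.startswith("INCLUDE"):
--         group = "include"
--     elif criterion.startswith("EXCLUDE"):
--         group = "exclude"
--     else:
--         return None
--     answer = (item.get("answer") or "").strip().upper()
--     bucket = "yes" if answer == "YES" else ("no" if answer == "NO" else "insufficient")
--     return (group, bucket)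
--
--
-- def count_answers(parsed):
--     return {
--         g: {b: sum(1 for item in parsed if classify(item) == (g, b))
--             for b in ("yes", "no", "insufficient")}
--         for g in ("include", "exclude")
--     }
-- ===== Notes on version B (the rewrite author's own statement) =====
-- stated objective: alternative
-- what changed: Replaced the single classify-and-increment pass mutating a nested counts dict by a pure classify(item) helper plus a result-shaped nested comprehension in which each of the six cells is its own filtered count over the input.
import Mathlib
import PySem

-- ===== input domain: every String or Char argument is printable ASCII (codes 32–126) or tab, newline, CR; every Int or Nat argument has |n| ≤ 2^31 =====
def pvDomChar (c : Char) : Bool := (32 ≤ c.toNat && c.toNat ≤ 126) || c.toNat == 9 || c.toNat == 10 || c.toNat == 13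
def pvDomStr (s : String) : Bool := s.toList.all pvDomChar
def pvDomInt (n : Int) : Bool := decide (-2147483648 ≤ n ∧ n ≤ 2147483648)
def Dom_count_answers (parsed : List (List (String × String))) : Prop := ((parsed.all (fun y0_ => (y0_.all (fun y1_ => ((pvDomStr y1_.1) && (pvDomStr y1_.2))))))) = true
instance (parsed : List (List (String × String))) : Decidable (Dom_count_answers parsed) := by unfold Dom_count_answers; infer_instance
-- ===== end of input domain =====

-- B replaces A's single mutate-the-nested-dict pass by a pure classify helper and six
-- result-shaped filtered counts (different decomposition, same O(n) cost).

-- ===== PORT A =====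
-- (item.get(k) or "").strip().upper(): first-match lookup, None/missing and "" both give ""
def pvAField (item : List (String × String)) (k : String) : String :=
  PySem.Str.upper (PySem.Str.strip ((item.find? (fun p => p.1 == k)).map (·.2) |>.getD ""))

-- counts[b] += 1 on the inner dict (assoc-list representation of the dict)
def pvABump1 : List (String × Int) → String → List (String × Int)
  | [], _ => []
  | (k, v) :: rest, b => if k == b then (k, v + 1) :: rest else (k, v) :: pvABump1 rest b

-- counts[group][b] += 1 on the outer dict
def pvABump2 : List (String × List (String × Int)) → String → String → List (String × List (String × Int))
  | [], _, _ => []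
  | (k, d) :: rest, g, b => if k == g then (k, pvABump1 d b) :: rest else (k, d) :: pvABump2 rest g b

def pvAStep (counts : List (String × List (String × Int))) (item : List (String × String)) :
    List (String × List (String × Int)) :=
  let answer := pvAField item "answer"
  let criterion := pvAField item "criterion"
  let group? : Option String :=
    if PySem.Str.startswith criterion "INCLUDE" then some "include"
    else if PySem.Str.startswith criterion "EXCLUDE" then some "exclude"
    else none  -- continue
  match group? with
  | none => counts
  | some group =>
      if answer == "YES" then pvABump2 counts group "yes"
      else if answer == "NO" then pvABump2 counts group "no"
      else pvABump2 counts group "insufficient"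

def count_answers (parsed : List (List (String × String))) : List (String × List (String × Int)) :=
  parsed.foldl pvAStep
    [("include", [("yes", 0), ("no", 0), ("insufficient", 0)]),
     ("exclude", [("yes", 0), ("no", 0), ("insufficient", 0)])]

-- ===== PORT B =====
def pvClassify (item : List (String × String)) : Option (String × String) :=
  let criterion := PySem.Str.upper (PySem.Str.strip ((item.find? (fun p => p.1 == "criterion")).map (·.2) |>.getD ""))
  if PySem.Str.startswith criterion "INCLUDE" then
    let answer := PySem.Str.upper (PySem.Str.strip ((item.find? (fun p => p.1 == "answer")).map (·.2) |>.getD ""))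
    some ("include", if answer == "YES" then "yes" else if answer == "NO" then "no" else "insufficient")
  else if PySem.Str.startswith criterion "EXCLUDE" then
    let answer := PySem.Str.upper (PySem.Str.strip ((item.find? (fun p => p.1 == "answer")).map (·.2) |>.getD ""))
    some ("exclude", if answer == "YES" then "yes" else if answer == "NO" then "no" else "insufficient")
  else none

-- sum(1 for item in parsed if classify(item) == (g, b))
def pvCell (parsed : List (List (String × String))) (g b : String) : Int :=
  (parsed.countP (fun item => pvClassify item == some (g, b)) : Int)

def count_answers_alt (parsed : List (List (String × String))) : List (String × List (String × Int)) :=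
  ["include", "exclude"].map (fun g =>
    (g, ["yes", "no", "insufficient"].map (fun b => (b, pvCell parsed g b))))

-- ===== PRECONDITION & SPEC =====
def Spec_count_answers (parsed : List (List (String × String))) (out : List (String × List (String × Int))) : Prop := out = count_answers_alt parsed
instance (parsed : List (List (String × String))) (out : List (String × List (String × Int))) : Decidable (Spec_count_answers parsed out) := by unfold Spec_count_answers; infer_instance

-- ===== CLAIM (what is proved, stated in full; the proofs are below) =====
def Claim_equal_count_answers : Prop := ∀ (parsed : List (List (String × String))), Dom_count_answers parsed → Spec_count_answers parsed (count_answers parsed)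

-- ===== LEMMAS AND PROOFS =====

theorem foldA_eq (l : List (List (String × String))) (a b c d e f : Int) :
    l.foldl pvAStep
      [("include", [("yes", a), ("no", b), ("insufficient", c)]),
       ("exclude", [("yes", d), ("no", e), ("insufficient", f)])] =
      [("include", [("yes", a + pvCell l "include" "yes"), ("no", b + pvCell l "include" "no"),
        ("insufficient", c + pvCell l "include" "insufficient")]),
       ("exclude", [("yes", d + pvCell l "exclude" "yes"), ("no", e + pvCell l "exclude" "no"),
        ("insufficient", f + pvCell l "exclude" "insufficient")])] := by
  induction l generalizing a b c d e f with
  | nil => simp [pvCell]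
  | cons x l ih =>
    have step :
        ∀ (a b c d e f : Int), pvAStep
          [("include", [("yes", a), ("no", b), ("insufficient", c)]),
           ("exclude", [("yes", d), ("no", e), ("insufficient", f)])] x =
          [("include", [("yes", a + if pvClassify x == some ("include", "yes") then 1 else 0),
            ("no", b + if pvClassify x == some ("include", "no") then 1 else 0),
            ("insufficient", c + if pvClassify x == some ("include", "insufficient") then 1 else 0)]),
           ("exclude", [("yes", d + if pvClassify x == some ("exclude", "yes") then 1 else 0),
            ("no", e + if pvClassify x == some ("exclude", "no") then 1 else 0),
            ("insufficient", f + if pvClassify x == some ("exclude", "insufficient") then 1 else 0)])] := by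
      intro a b c d e f
      simp only [pvAStep, pvClassify, pvAField, PySem.Str.startswith_eq, PySem.Str.toList_upper,
        PySem.Str.toList_strip]
      by_cases h1 : PySem.Chars.startswith (PySem.Chars.upper (PySem.Chars.strip ((Option.map (fun x => x.2) (List.find? (fun p => p.1 == "criterion") x)).getD "").toList)) ("INCLUDE".toList) = true <;>
      by_cases h2 : PySem.Chars.startswith (PySem.Chars.upper (PySem.Chars.strip ((Option.map (fun x => x.2) (List.find? (fun p => p.1 == "criterion") x)).getD "").toList)) ("EXCLUDE".toList) = true <;>
      by_cases h3 : (PySem.Str.upper (PySem.Str.strip ((Option.map (fun x => x.2) (List.find? (fun p => p.1 == "answer") x)).getD "")) == "YES") = true <;>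
      by_cases h4 : (PySem.Str.upper (PySem.Str.strip ((Option.map (fun x => x.2) (List.find? (fun p => p.1 == "answer") x)).getD "")) == "NO") = true <;>
      simp only [h1, h2, h3, h4, if_true, if_false, Bool.false_eq_true] <;>
      simp [pvABump2, pvABump1]
    rw [List.foldl_cons, step, ih]
    simp only [pvCell, List.countP_cons, List.cons.injEq, Prod.mk.injEq, and_true, true_and]
    push_cast
    and_intros <;> first | rfl | (split <;> omega)

-- ===== VERDICT (by name: the statement is the Claim_ definition above) =====
theorem count_answers_spec : Claim_equal_count_answers := by
  intro parsed _
  unfold Spec_count_answers count_answers count_answers_alt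
  rw [foldA_eq]
  simp
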